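-- pv_equiv track=rewrite | github.com/Akashyo7/prosora-project-x | content_generator.py | _parse_predictions
-- ===== SOURCE A (Python) =====
-- from typing import Dict, List
--
-- def _parse_predictions(predictions_text: str) -> List[Dict]:
--     """Parse predictions from AI response"""
--     predictions = []
--     lines = predictions_text.split('\n')
--     current_prediction = {}
--
--     for line in lines:
--         line = line.strip()
--         if line.startswith('- Prediction:'):
--             if current_prediction:
--                 predictions.append(current_prediction)
--             current_prediction = {"prediction": line.replace('- Prediction:', '').strip()}
--         elif line.startswith('- Confidence:'):
--             current_prediction["confidence"] = line.replace('- Confidence:', '').strip()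
--         elif line.startswith('- Rationale:'):
--             current_prediction["rationale"] = line.replace('- Rationale:', '').strip()
--         elif line.startswith('- Watch for:'):
--             current_prediction["indicators"] = line.replace('- Watch for:', '').strip()
--
--     if current_prediction:
--         predictions.append(current_prediction)
--
--     return predictions
-- ===== SOURCE B (Python) =====
-- def _parse_predictions(predictions_text):
--     # Pass 1: partition stripped lines into groups, opening a new group at each
--     # '- Prediction:' marker; lines before the first marker form the leading group.
--     groups = [[]]
--     for raw in predictions_text.split('\n'):
--         line = raw.strip()
--         if line.startswith('- Prediction:'):
--             groups.append([line])
--         else: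
--             groups[-1].append(line)
--     # Pass 2: convert each group to a record; keep only non-empty records.
--     predictions = []
--     for group in groups:
--         record = {}
--         for line in group:
--             if line.startswith('- Prediction:'):
--                 record["prediction"] = line.replace('- Prediction:', '').strip()
--             elif line.startswith('- Confidence:'):
--                 record["confidence"] = line.replace('- Confidence:', '').strip()
--             elif line.startswith('- Rationale:'):
--                 record["rationale"] = line.replace('- Rationale:', '').strip()
--             elif line.startswith('- Watch for:'):
--                 record["indicators"] = line.replace('- Watch for:', '').strip()
--         if record:
--             predictions.append(record)
--     return predictions
-- ===== Notes on version B (the rewrite author's own statement) =====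
-- stated objective: alternative
-- what changed: Replaces A's single fold that mutates a current-record dict and flushes it at each marker with a two-pass decomposition: first partition the stripped lines into groups opened at each '- Prediction:' marker (lines before the first marker form a leading group), then convert each group to a record and keep the non-empty ones.
import Mathlib
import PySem

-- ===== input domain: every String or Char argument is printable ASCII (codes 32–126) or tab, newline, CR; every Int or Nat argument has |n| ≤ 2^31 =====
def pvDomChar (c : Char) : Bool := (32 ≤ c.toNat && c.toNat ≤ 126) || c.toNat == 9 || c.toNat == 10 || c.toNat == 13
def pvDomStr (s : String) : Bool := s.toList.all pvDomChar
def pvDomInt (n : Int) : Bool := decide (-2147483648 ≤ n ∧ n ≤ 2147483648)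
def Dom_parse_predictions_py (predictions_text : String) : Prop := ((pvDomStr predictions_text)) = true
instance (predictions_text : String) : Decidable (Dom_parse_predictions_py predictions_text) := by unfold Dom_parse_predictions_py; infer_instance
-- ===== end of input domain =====

-- B replaces A's flush-as-you-go fold with a two-pass decomposition (partition lines
-- into marker-opened groups, then convert each group to a record); objective: alternative.


-- ===== PORT A =====
-- one step of A's loop: strip the line, flush/reset the current record at a marker,
-- otherwise set the matching field in place
def pvStepA (st : List (PySem.Dict String String) × PySem.Dict String String) (raw : String) :
    List (PySem.Dict String String) × PySem.Dict String String :=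
  let line := PySem.Str.strip raw
  if PySem.Str.startswith line "- Prediction:" then
    ((if st.2.items = [] then st.1 else st.1 ++ [st.2]),
     PySem.Dict.empty.insert "prediction" (PySem.Str.strip (PySem.Str.replace line "- Prediction:" "")))
  else if PySem.Str.startswith line "- Confidence:" then
    (st.1, st.2.insert "confidence" (PySem.Str.strip (PySem.Str.replace line "- Confidence:" "")))
  else if PySem.Str.startswith line "- Rationale:" then
    (st.1, st.2.insert "rationale" (PySem.Str.strip (PySem.Str.replace line "- Rationale:" "")))
  else if PySem.Str.startswith line "- Watch for:" then
    (st.1, st.2.insert "indicators" (PySem.Str.strip (PySem.Str.replace line "- Watch for:" "")))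
  else st

-- split? is always `some` here (sep "\n" ≠ ""), so `.getD []` never supplies the default
def parse_predictions_py (predictions_text : String) : List (List (String × String)) :=
  let lines := (PySem.Str.split? predictions_text "\n").getD []
  let st := lines.foldl pvStepA ([], PySem.Dict.empty)
  let preds := if st.2.items = [] then st.1 else st.1 ++ [st.2]
  preds.map (fun d => d.items)

-- ===== PORT B =====
-- pass 1 step: open a new group at a marker line, else append the stripped line to the last group
def pvGroupStep (gs : List (List String)) (raw : String) : List (List String) :=
  let line := PySem.Str.strip raw
  if PySem.Str.startswith line "- Prediction:" then gs ++ [[line]]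
  else gs.dropLast ++ [(gs.getLast?.getD []) ++ [line]]

-- pass 2 inner step: fill the matching field of the record (lines are already stripped)
def pvStepB (d : PySem.Dict String String) (line : String) : PySem.Dict String String :=
  if PySem.Str.startswith line "- Prediction:" then
    d.insert "prediction" (PySem.Str.strip (PySem.Str.replace line "- Prediction:" ""))
  else if PySem.Str.startswith line "- Confidence:" then
    d.insert "confidence" (PySem.Str.strip (PySem.Str.replace line "- Confidence:" ""))
  else if PySem.Str.startswith line "- Rationale:" then
    d.insert "rationale" (PySem.Str.strip (PySem.Str.replace line "- Rationale:" ""))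
  else if PySem.Str.startswith line "- Watch for:" then
    d.insert "indicators" (PySem.Str.strip (PySem.Str.replace line "- Watch for:" ""))
  else d

def parse_predictions_py_alt (predictions_text : String) : List (List (String × String)) :=
  let groups := ((PySem.Str.split? predictions_text "\n").getD []).foldl pvGroupStep [[]]
  groups.foldl
    (fun acc g =>
      let record := g.foldl pvStepB PySem.Dict.empty
      if record.items = [] then acc else acc ++ [record.items]) []

-- ===== PRECONDITION & SPEC =====
def Spec_parse_predictions_py (predictions_text : String) (out : List (List (String × String))) : Prop := out = parse_predictions_py_alt predictions_text
instance (predictions_text : String) (out : List (List (String × String))) : Decidable (Spec_parse_predictions_py predictions_text out) := by unfold Spec_parse_predictions_py; infer_instance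

-- ===== CLAIM (what is proved, stated in full; the proofs are below) =====
def Claim_equal_parse_predictions_py : Prop := ∀ (predictions_text : String), Dom_parse_predictions_py predictions_text → Spec_parse_predictions_py predictions_text (parse_predictions_py predictions_text)

-- ===== LEMMAS AND PROOFS =====

-- common specification: process the remaining lines with a current record, flushing at markers
def pvRun (cur : PySem.Dict String String) : List String → List (PySem.Dict String String)
  | [] => if cur.items = [] then [] else [cur]
  | raw :: rest =>
    let line := PySem.Str.strip raw
    if PySem.Str.startswith line "- Prediction:" then
      (if cur.items = [] then [] else [cur]) ++
        pvRun (PySem.Dict.empty.insert "prediction"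
          (PySem.Str.strip (PySem.Str.replace line "- Prediction:" ""))) rest
    else pvRun (pvStepB cur line) rest

-- groups produced from a current partial group by the remaining lines
def pvGroups (curg : List String) : List String → List (List String)
  | [] => [curg]
  | raw :: rest =>
    let line := PySem.Str.strip raw
    if PySem.Str.startswith line "- Prediction:" then curg :: pvGroups [line] rest
    else pvGroups (curg ++ [line]) rest

def pvDictOf (g : List String) : PySem.Dict String String := g.foldl pvStepB PySem.Dict.empty

def pvEmitAll (gs : List (List String)) : List (PySem.Dict String String) :=
  gs.flatMap (fun g => if (pvDictOf g).items = [] then [] else [pvDictOf g])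

lemma pvA_run (ls : List String) : ∀ (preds : List (PySem.Dict String String)) cur,
    (let st := ls.foldl pvStepA (preds, cur);
     if st.2.items = [] then st.1 else st.1 ++ [st.2]) = preds ++ pvRun cur ls := by
  induction ls with
  | nil =>
    intro preds cur
    simp only [List.foldl, pvRun]
    split_ifs <;> simp
  | cons raw rest ih =>
    intro preds cur
    simp only [List.foldl, pvRun, pvStepA]
    by_cases h1 : PySem.Str.startswith (PySem.Str.strip raw) "- Prediction:"
    · simp only [h1, if_true, ih]
      split_ifs <;> simp
    · by_cases h2 : PySem.Str.startswith (PySem.Str.strip raw) "- Confidence:" <;>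
        by_cases h3 : PySem.Str.startswith (PySem.Str.strip raw) "- Rationale:" <;>
        by_cases h4 : PySem.Str.startswith (PySem.Str.strip raw) "- Watch for:" <;>
        simp only [h1, h2, h3, h4, if_true, if_false, Bool.false_eq_true, ih, pvStepB]

lemma pvB_groups (ls : List String) : ∀ (done : List (List String)) curg,
    ls.foldl pvGroupStep (done ++ [curg]) = done ++ pvGroups curg ls := by
  induction ls with
  | nil => intro done curg; simp [pvGroups]
  | cons raw rest ih =>
    intro done curg
    simp only [List.foldl, pvGroupStep, pvGroups]
    by_cases h : PySem.Str.startswith (PySem.Str.strip raw) "- Prediction:"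
    · simp only [h, if_true]
      have := ih (done ++ [curg]) [PySem.Str.strip raw]
      simpa using this
    · simp only [h, if_false, Bool.false_eq_true, List.dropLast_concat, List.getLast?_concat,
        Option.getD_some, ih]

lemma pvRun_groups (ls : List String) : ∀ curg,
    pvRun (pvDictOf curg) ls = pvEmitAll (pvGroups curg ls) := by
  induction ls with
  | nil => intro curg; simp [pvRun, pvGroups, pvEmitAll]
  | cons raw rest ih =>
    intro curg
    simp only [pvRun, pvGroups]
    by_cases h : PySem.Str.startswith (PySem.Str.strip raw) "- Prediction:"
    · simp only [h, if_true, pvEmitAll, List.flatMap_cons]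
      have hd : PySem.Dict.empty.insert "prediction"
          (PySem.Str.strip (PySem.Str.replace (PySem.Str.strip raw) "- Prediction:" ""))
          = pvDictOf [PySem.Str.strip raw] := by
        simp only [pvDictOf, List.foldl, pvStepB]
        rw [if_pos h]
      rw [hd, ih]
      rfl
    · simp only [h, if_false, Bool.false_eq_true]
      have hd : pvStepB (pvDictOf curg) (PySem.Str.strip raw)
          = pvDictOf (curg ++ [PySem.Str.strip raw]) := by
        simp [pvDictOf]
      rw [hd, ih]

lemma pvConv (gs : List (List String)) : ∀ acc,
    gs.foldl (fun acc g =>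
      let record := g.foldl pvStepB PySem.Dict.empty
      if record.items = [] then acc else acc ++ [record.items]) acc
    = acc ++ (pvEmitAll gs).map (fun d => d.items) := by
  induction gs with
  | nil => intro acc; simp [pvEmitAll]
  | cons g rest ih =>
    intro acc
    simp only [List.foldl, pvEmitAll, List.flatMap_cons, pvDictOf, ih]
    by_cases h : (List.foldl pvStepB PySem.Dict.empty g).items = [] <;> simp [h]

-- ===== VERDICT (by name: the statement is the Claim_ definition above) =====
theorem parse_predictions_py_spec : Claim_equal_parse_predictions_py := by
  intro t _
  unfold Spec_parse_predictions_py parse_predictions_py parse_predictions_py_alt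
  have hA := pvA_run ((PySem.Str.split? t "\n").getD []) [] PySem.Dict.empty
  have hB := pvB_groups ((PySem.Str.split? t "\n").getD []) [] []
  simp only [List.nil_append] at hA hB
  simp only [hA, hB, pvConv, List.nil_append]
  have : PySem.Dict.empty = pvDictOf ([] : List String) := rfl
  rw [this, pvRun_groups]
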